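-- pv_equiv track=rewrite | github.com/hempnall/aoc2023 | day13/a.py | find_symmetry
-- ===== SOURCE A (Python) =====
-- def find_symmetry( box ,fact):
--     # check for horizontal symmetry
--     len_of_box=len(box)
--     for idx in range( len_of_box -1 ):
--         if box[idx] == box[idx+1]:
--             top=box[0:idx+1][::-1]#.reverse()
--             bottom=box[idx+1:]
--             min_len=min(len(top),len(bottom))
--             if top[0:min_len] == bottom[0:min_len]:
--                 return fact * (idx + 1)
--     return 0
-- ===== SOURCE B (Python) =====
-- def find_symmetry(box, fact):
--     # expand-around-center two-pointer instead of slice/reverse/compare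
--     n = len(box)
--     for idx in range(n - 1):
--         i, j = idx, idx + 1
--         while i >= 0 and j < n:
--             if box[i] != box[j]:
--                 break
--             i -= 1
--             j += 1
--         else:
--             return fact * (idx + 1)
--     return 0
-- ===== Notes on version B (the rewrite author's own statement) =====
-- stated objective: alternative
-- what changed: Replaced the slice-reverse-and-compare reflection test with an expand-around-center two-pointer loop that compares rows in place and stops at the first mismatch, building no intermediate lists.
import Mathlib
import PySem

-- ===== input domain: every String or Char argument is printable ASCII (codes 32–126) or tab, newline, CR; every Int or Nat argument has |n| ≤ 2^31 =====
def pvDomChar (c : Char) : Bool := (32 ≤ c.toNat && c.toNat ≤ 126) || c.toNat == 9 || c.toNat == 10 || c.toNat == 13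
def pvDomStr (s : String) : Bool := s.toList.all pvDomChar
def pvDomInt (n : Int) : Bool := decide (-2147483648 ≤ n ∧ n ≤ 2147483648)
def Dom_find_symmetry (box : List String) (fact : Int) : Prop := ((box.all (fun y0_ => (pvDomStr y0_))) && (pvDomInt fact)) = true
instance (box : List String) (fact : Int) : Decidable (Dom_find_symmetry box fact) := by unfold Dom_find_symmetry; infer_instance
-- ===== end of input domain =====

-- B replaces A's slice-reverse-and-compare reflection test by an expand-around-center
-- two-pointer loop (alternative decomposition; same return value everywhere).

-- ===== PORT A =====
-- the body of A's 'if box[idx] == box[idx+1]' candidate test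
def fsA_check (box : List String) (idx : Nat) : Bool :=
  if PySem.List.pyGetD box (idx : Int) "" == PySem.List.pyGetD box ((idx : Int) + 1) "" then
    -- top = box[0:idx+1][::-1]  ([::-1] via slice?, exact)
    let top := (PySem.List.slice? (PySem.List.slice box (some 0) (some ((idx : Int) + 1))) none none (-1)).getD []
    let bottom := PySem.List.slice box (some ((idx : Int) + 1)) none
    let minLen : Nat := min top.length bottom.length
    PySem.List.slice top (some 0) (some (minLen : Int)) == PySem.List.slice bottom (some 0) (some (minLen : Int))
  else false

-- the 'for idx in range(len(box)-1)' loop with early return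
def fsA_go (box : List String) (fact : Int) (idx : Nat) : Int :=
  if idx + 1 < box.length then
    if fsA_check box idx then fact * ((idx : Int) + 1) else fsA_go box fact (idx + 1)
  else 0
termination_by box.length - idx

def find_symmetry (box : List String) (fact : Int) : Int := fsA_go box fact 0

-- ===== PORT B =====
-- 'while i >= 0 and j < n: if box[i] != box[j]: break; i -= 1; j += 1' — returns true iff no break
def fsB_while (box : List String) (i : Int) (j : Nat) : Bool :=
  if 0 ≤ i ∧ j < box.length then
    if box.getD i.toNat "" != box.getD j "" then false
    else fsB_while box (i - 1) (j + 1)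
  else true
termination_by box.length - j

-- 'for idx in range(n-1): … else return fact*(idx+1)'
def fsB_go (box : List String) (fact : Int) (idx : Nat) : Int :=
  if idx + 1 < box.length then
    if fsB_while box (idx : Int) (idx + 1) then fact * ((idx : Int) + 1) else fsB_go box fact (idx + 1)
  else 0
termination_by box.length - idx

def find_symmetry_alt (box : List String) (fact : Int) : Int := fsB_go box fact 0

-- ===== PRECONDITION & SPEC =====
def Spec_find_symmetry (box : List String) (fact : Int) (out : Int) : Prop := out = find_symmetry_alt box fact
instance (box : List String) (fact : Int) (out : Int) : Decidable (Spec_find_symmetry box fact out) := by unfold Spec_find_symmetry; infer_instance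

-- ===== CLAIM (what is proved, stated in full; the proofs are below) =====
def Claim_equal_find_symmetry : Prop := ∀ (box : List String) (fact : Int), Dom_find_symmetry box fact → Spec_find_symmetry box fact (find_symmetry box fact)

-- ===== LEMMAS AND PROOFS =====

-- common characterisation: both inner tests decide prefixEq of the reversed top against the bottom
def prefixEq : List String → List String → Bool
  | [], _ => true
  | _, [] => true
  | a :: as, b :: bs => a == b && prefixEq as bs

theorem prefixEq_nil_right (l : List String) : prefixEq l [] = true := by
  cases l <;> rfl

theorem take_min_beq_eq_prefixEq (l r : List String) :
    (l.take (min l.length r.length) == r.take (min l.length r.length)) = prefixEq l r := by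
  induction l generalizing r with
  | nil => cases r <;> simp [prefixEq]
  | cons a as ih =>
    cases r with
    | nil => simp [prefixEq]
    | cons b bs =>
      simp only [List.length_cons, Nat.succ_min_succ, List.take_succ_cons, prefixEq,
        List.cons_beq_cons, ih]

theorem take_succ_reverse {l : List String} {k : Nat} (h : k < l.length) :
    (l.take (k + 1)).reverse = l[k] :: (l.take k).reverse := by
  rw [List.take_add_one, List.getElem?_eq_getElem h]
  simp

theorem fsB_while_eq (box : List String) (i : Int) (j : Nat) (hi : i < (box.length : Int)) :
    fsB_while box i j = prefixEq ((box.take (i + 1).toNat).reverse) (box.drop j) := by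
  rw [fsB_while]
  split
  · rename_i h
    obtain ⟨h0, hj⟩ := h
    have hik : i.toNat < box.length := by omega
    have h1 : (i + 1).toNat = i.toNat + 1 := by omega
    rw [h1, take_succ_reverse hik, List.drop_eq_getElem_cons hj]
    have hrec := fsB_while_eq box (i - 1) (j + 1) (by omega)
    have h2 : (i - 1 + 1).toNat = i.toNat := by omega
    rw [h2] at hrec
    simp only [prefixEq, List.getD_eq_getElem _ _ hik, List.getD_eq_getElem _ _ hj]
    by_cases hb : box[i.toNat] == box[j]
    · simp [bne, hb, hrec]
    · simp [bne, hb]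
  · rename_i h
    rw [not_and_or] at h
    rcases h with h | h
    · have : (i + 1).toNat = 0 := by omega
      rw [this]
      simp [prefixEq]
    · rw [List.drop_eq_nil_of_le (by omega), prefixEq_nil_right]
termination_by box.length - j

theorem fsA_check_eq (box : List String) (idx : Nat) (h : idx + 1 < box.length) :
    fsA_check box idx = prefixEq ((box.take (idx + 1)).reverse) (box.drop (idx + 1)) := by
  have hidx : idx < box.length := by omega
  unfold fsA_check
  have hcast : ((idx : Int) + 1) = ((idx + 1 : Nat) : Int) := by push_cast; ring
  rw [hcast]
  simp only [PySem.List.pyGetD_natCast, PySem.List.slice_zero_start,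
    PySem.List.slice_to_natCast, PySem.List.slice?_none_none_neg_one,
    PySem.List.slice_from_natCast, Option.getD_some]
  set top := (box.take (idx + 1)).reverse with htop
  set bottom := box.drop (idx + 1) with hbot
  rw [take_min_beq_eq_prefixEq]
  -- heads of top and bottom
  have htc : top = box[idx] :: (box.take idx).reverse := take_succ_reverse hidx
  have hbc : bottom = box[idx + 1] :: box.drop (idx + 2) := List.drop_eq_getElem_cons h
  rw [htc, hbc]
  simp only [prefixEq, List.getD_eq_getElem _ _ hidx, List.getD_eq_getElem _ _ h]
  by_cases hb : box[idx] == box[idx + 1]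
  · simp [hb]
  · simp [hb]

theorem fsA_go_eq_fsB_go (box : List String) (fact : Int) (idx : Nat) :
    fsA_go box fact idx = fsB_go box fact idx := by
  rw [fsA_go, fsB_go]
  split
  · rename_i h
    have hB := fsB_while_eq box (idx : Int) (idx + 1) (by exact_mod_cast by omega)
    have h1 : ((idx : Int) + 1).toNat = idx + 1 := by omega
    rw [h1] at hB
    rw [fsA_check_eq box idx h, ← hB, fsA_go_eq_fsB_go box fact (idx + 1)]
  · rfl
termination_by box.length - idx

-- ===== VERDICT (by name: the statement is the Claim_ definition above) =====
theorem find_symmetry_spec : Claim_equal_find_symmetry := by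
  intro box fact _
  show find_symmetry box fact = find_symmetry_alt box fact
  exact fsA_go_eq_fsB_go box fact 0
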